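-- pv_equiv track=rewrite | github.com/estrellita12/programming | programmers/level1/12912_두_정수_사이의_합.py | solution
-- ===== SOURCE A (Python) =====
-- def solution(a, b):
--     answer = 0
--     if a<=b:
--         n1 = a
--         n2 = b
--     else:
--         n1 = b
--         n2 = a
--     for i in range(n1,n2+1):
--         answer += i
--
--     return answer
-- ===== SOURCE B (Python) =====
-- def solution(a, b):
--     return (a + b) * (abs(a - b) + 1) // 2
-- ===== Notes on version B (the rewrite author's own statement) =====
-- stated objective: faster
-- what changed: Replaced the O(|b-a|) summation loop (with its min/max branch) by the branchless closed-form formula (a+b)*(abs(a-b)+1)//2.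
import Mathlib
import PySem

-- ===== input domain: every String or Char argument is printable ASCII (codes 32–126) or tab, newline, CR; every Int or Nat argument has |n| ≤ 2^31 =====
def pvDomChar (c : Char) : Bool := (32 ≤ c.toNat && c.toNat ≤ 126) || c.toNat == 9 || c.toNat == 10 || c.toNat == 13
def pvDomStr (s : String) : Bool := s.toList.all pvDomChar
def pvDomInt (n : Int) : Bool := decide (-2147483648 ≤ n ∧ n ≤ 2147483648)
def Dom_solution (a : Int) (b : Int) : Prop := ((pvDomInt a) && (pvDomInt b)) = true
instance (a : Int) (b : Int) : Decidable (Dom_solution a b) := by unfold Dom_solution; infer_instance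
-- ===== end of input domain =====

-- B replaces A's O(|b-a|) summation loop and its min/max branch by the branchless
-- closed-form formula (a+b)*(abs(a-b)+1)//2 (objective: faster).

-- ===== PORT A =====
def solution (a : Int) (b : Int) : Int :=
  let answer : Int := 0
  let p := if a ≤ b then (a, b) else (b, a)
  (PySem.List.pyRange p.1 (p.2 + 1) 1).foldl (fun answer i => answer + i) answer

-- ===== PORT B =====
def solution_alt (a : Int) (b : Int) : Int :=
  PySem.Int.floordiv ((a + b) * (|a - b| + 1)) 2

-- ===== PRECONDITION & SPEC =====
def Spec_solution (a : Int) (b : Int) (out : Int) : Prop := out = solution_alt a b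
instance (a : Int) (b : Int) (out : Int) : Decidable (Spec_solution a b out) := by unfold Spec_solution; infer_instance

-- ===== CLAIM (what is proved, stated in full; the proofs are below) =====
def Claim_equal_solution : Prop := ∀ (a : Int) (b : Int), Dom_solution a b → Spec_solution a b (solution a b)

-- ===== LEMMAS AND PROOFS =====

theorem sum_pyRange_gauss (n : Nat) (a : Int) :
    2 * ((PySem.List.pyRange a (a + n) 1).foldl (fun acc i => acc + i) 0)
      = n * (2 * a + n - 1) := by
  induction n with
  | zero => simp [PySem.List.pyRange_one_eq_nil]
  | succ k ih =>
    have h1 : a ≤ a + (k : Int) := by omega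
    have : (a + (k + 1 : Nat) : Int) = (a + k) + 1 := by push_cast; ring
    rw [this, PySem.List.pyRange_one_succ_right h1, List.foldl_append]
    simp only [List.foldl]
    push_cast
    rw [mul_add, ih]
    ring

theorem closed_form (n1 n2 : Int) (h : n1 ≤ n2) :
    (PySem.List.pyRange n1 (n2 + 1) 1).foldl (fun acc i => acc + i) 0
      = PySem.Int.floordiv ((n1 + n2) * (n2 - n1 + 1)) 2 := by
  have hn : n2 + 1 = n1 + ((n2 + 1 - n1).toNat : Int) := by omega
  have h2 := sum_pyRange_gauss (n2 + 1 - n1).toNat n1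
  rw [← hn] at h2
  set S := (PySem.List.pyRange n1 (n2 + 1) 1).foldl (fun acc i => acc + i) 0 with hS
  have hc : ((n2 + 1 - n1).toNat : Int) = n2 + 1 - n1 := by omega
  rw [hc] at h2
  have hp : (n1 + n2) * (n2 - n1 + 1) = 2 * S := by rw [h2]; ring
  rw [hp, PySem.Int.floordiv_eq_ediv_of_pos (by norm_num)]
  exact (Int.mul_ediv_cancel_left S (by norm_num : (2:Int) ≠ 0)).symm

-- ===== VERDICT (by name: the statement is the Claim_ definition above) =====
theorem solution_spec : Claim_equal_solution := by
  intro a b _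
  unfold Spec_solution solution solution_alt
  by_cases h : a ≤ b
  · simp only [if_pos h]
    have habs : |a - b| = b - a := by rw [abs_of_nonpos (by omega)]; ring
    rw [habs]
    have := closed_form a b h
    simpa [add_comm] using this
  · simp only [if_neg h]
    have habs : |a - b| = a - b := abs_of_nonneg (by omega)
    rw [habs]
    have := closed_form b a (by omega)
    rw [this]
    ring_nf
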